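-- pv_equiv track=rewrite | github.com/liuzhiliangpc/shop-article | tools/utils.py | custom_replace_word
-- ===== SOURCE A (Python) =====
-- def custom_replace_word(text, match_start_end_list, target_word):
--     """
--     自定义替换指定位置的词语，正文替换地名和正文布词公共函数
--     :param text: 文本
--     :param match_start_end_list: 需要替换的位置，格式:[[a,b]]嵌套列表
--     :param target_word: 替换后目标字符串
--     :return:
--     """
--     # 尝试简化方案，仅一个list[list]
--     text_split = []
--     for index, item in enumerate(match_start_end_list):
--         # 首字符处理
--         if index == 0 and item[0] != 0:
--             text_split.append(text[:item[0]])
--         # 中间列表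
--         if index > 0:
--             text_split.append(text[match_start_end_list[index - 1][1]:item[0]])
--         # 替换：text[item[0]:item[1]]位置替换为目标关键词
--         text_split.append(target_word)
--         # 尾字符处理
--         if index + 1 == len(match_start_end_list):
--             if item[1] < len(text):
--                 text_split.append(text[item[1]:])
--     if text_split:
--         text = "".join(text_split)  # 随机换词后的正文
--     else:
--         text = text  # 缺省为原始文本
--     return text
-- ===== SOURCE B (Python) =====
-- def custom_replace_word(text, match_start_end_list, target_word):
--     """Staged column extraction + join-with-separator: pull the start and end
--     columns out of the spans, zip consecutive kept-slice bounds, and join the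
--     kept slices using target_word as the separator (no loop, no accumulator,
--     no cursor variable)."""
--     starts = [span[0] for span in match_start_end_list]
--     ends = [span[1] for span in match_start_end_list]
--     kept = [text[p:q] for p, q in zip([0] + ends, starts + [len(text)])]
--     return target_word.join(kept)
-- ===== Notes on version B (the rewrite author's own statement) =====
-- stated objective: alternative
-- what changed: Replaces A's enumerate loop with index==0/index>0/last-index special cases and an accumulator list by three stage-wise comprehensions (extract start and end columns, zip consecutive kept-slice bounds, slice) finished by str.join with target_word as the SEPARATOR, so no loop state or replacement appends exist at all.
import Mathlib
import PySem

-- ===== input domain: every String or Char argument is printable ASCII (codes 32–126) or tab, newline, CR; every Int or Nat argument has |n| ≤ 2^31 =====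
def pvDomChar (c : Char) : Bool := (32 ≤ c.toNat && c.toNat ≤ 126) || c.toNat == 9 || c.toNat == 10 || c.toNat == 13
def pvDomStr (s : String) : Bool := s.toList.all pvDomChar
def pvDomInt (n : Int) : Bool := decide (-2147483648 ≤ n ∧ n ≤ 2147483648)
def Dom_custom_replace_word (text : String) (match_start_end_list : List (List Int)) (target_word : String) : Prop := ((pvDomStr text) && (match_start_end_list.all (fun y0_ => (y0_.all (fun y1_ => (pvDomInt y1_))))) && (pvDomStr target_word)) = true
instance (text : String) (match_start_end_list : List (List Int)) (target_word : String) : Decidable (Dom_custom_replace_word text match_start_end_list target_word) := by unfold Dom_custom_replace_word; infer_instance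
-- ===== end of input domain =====

-- B replaces A's stateful enumerate loop (index==0 / index>0 / last-index cases, lookbehind)
-- by stage-wise column extraction + zip + slicing, joined with target_word as the separator
-- (objective: alternative decomposition, same cost).
-- ===== PORT A =====
-- one loop iteration of A (index, item); acc is A's text_split
def pvStepA (text : String) (match_start_end_list : List (List Int)) (target_word : String)
    (acc : List String) (p : Int × List Int) : List String :=
  let index := p.1
  let item := p.2
  -- 首字符处理
  let acc := if index = 0 ∧ PySem.List.pyGetD item 0 0 ≠ 0 then
      acc ++ [PySem.Str.slice text none (some (PySem.List.pyGetD item 0 0))] else acc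
  -- 中间列表
  let acc := if 0 < index then
      acc ++ [PySem.Str.slice text
        (some (PySem.List.pyGetD (PySem.List.pyGetD match_start_end_list (index - 1) []) 1 0))
        (some (PySem.List.pyGetD item 0 0))] else acc
  -- 替换
  let acc := acc ++ [target_word]
  -- 尾字符处理
  if index + 1 = (match_start_end_list.length : Int) then
    (if PySem.List.pyGetD item 1 0 < PySem.Str.len text then
      acc ++ [PySem.Str.slice text (some (PySem.List.pyGetD item 1 0)) none] else acc)
  else acc

def custom_replace_word (text : String) (match_start_end_list : List (List Int)) (target_word : String) : String :=
  let text_split := (PySem.List.enumerate match_start_end_list 0).foldl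
    (pvStepA text match_start_end_list target_word) []
  if text_split = [] then text else PySem.Str.join "" text_split

-- ===== PORT B =====
-- staged comprehensions: start column, end column, zipped kept-slice bounds, join with separator
def custom_replace_word_alt (text : String) (match_start_end_list : List (List Int)) (target_word : String) : String :=
  let starts := match_start_end_list.map (fun span => PySem.List.pyGetD span 0 0)
  let ends := match_start_end_list.map (fun span => PySem.List.pyGetD span 1 0)
  let kept := (List.zip ((0 : Int) :: ends) (starts ++ [PySem.Str.len text])).map
    (fun p => PySem.Str.slice text (some p.1) (some p.2))
  PySem.Str.join target_word kept

-- ===== PRECONDITION & SPEC =====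
-- A raises IndexError (item[0] or item[1]) exactly when some inner list has fewer than 2 elements;
-- B raises there too (span[0]/span[1]); Pre_ excludes exactly those raising inputs.
def Pre_custom_replace_word (text : String) (match_start_end_list : List (List Int)) (target_word : String) : Prop :=
  ∀ item ∈ match_start_end_list, 2 ≤ item.length
instance (text : String) (match_start_end_list : List (List Int)) (target_word : String) : Decidable (Pre_custom_replace_word text match_start_end_list target_word) := by unfold Pre_custom_replace_word; infer_instance
def pvWitness_custom_replace_word : String × List (List Int) × String := ("abcdef", [[1, 3]], "XY")

def Spec_custom_replace_word (text : String) (match_start_end_list : List (List Int)) (target_word : String) (out : String) : Prop := out = custom_replace_word_alt text match_start_end_list target_word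
instance (text : String) (match_start_end_list : List (List Int)) (target_word : String) (out : String) : Decidable (Spec_custom_replace_word text match_start_end_list target_word out) := by unfold Spec_custom_replace_word; infer_instance

-- ===== CLAIM (what is proved, stated in full; the proofs are below) =====
def Claim_equal_custom_replace_word : Prop := ∀ (text : String) (match_start_end_list : List (List Int)) (target_word : String), Dom_custom_replace_word text match_start_end_list target_word → Pre_custom_replace_word text match_start_end_list target_word → Spec_custom_replace_word text match_start_end_list target_word (custom_replace_word text match_start_end_list target_word)

-- ===== LEMMAS AND PROOFS =====
-- flatten of a list of parts, as characters
def pvFlat (l : List String) : List Char := (l.map String.toList).flatten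

-- the common segment spec: untouched slice up to each span start, the target, then the tail
def pvSeg (t tgt : List Char) : Int → List (List Int) → List Char
  | prev, [] => PySem.List.slice t (some prev) none
  | prev, item :: rest =>
      PySem.List.slice t (some prev) (some (PySem.List.pyGetD item 0 0)) ++ tgt
        ++ pvSeg t tgt (PySem.List.pyGetD item 1 0) rest

-- A's contribution for the suffix after the first element (tail slice attached to the LAST item)
def pvSegA (t tgt : List Char) : Int → List (List Int) → List Char
  | _, [] => []
  | prev, item :: rest =>
      PySem.List.slice t (some prev) (some (PySem.List.pyGetD item 0 0)) ++ tgt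
        ++ (if rest = [] then PySem.List.slice t (some (PySem.List.pyGetD item 1 0)) none else [])
        ++ pvSegA t tgt (PySem.List.pyGetD item 1 0) rest

theorem pvSeg_nil (t tgt : List Char) (prev : Int) :
    pvSeg t tgt prev [] = PySem.List.slice t (some prev) none := rfl
theorem pvSeg_cons (t tgt : List Char) (prev : Int) (item : List Int) (rest : List (List Int)) :
    pvSeg t tgt prev (item :: rest)
      = PySem.List.slice t (some prev) (some (PySem.List.pyGetD item 0 0)) ++ tgt
          ++ pvSeg t tgt (PySem.List.pyGetD item 1 0) rest := rfl
theorem pvSegA_nil (t tgt : List Char) (prev : Int) : pvSegA t tgt prev [] = [] := rfl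
theorem pvSegA_cons (t tgt : List Char) (prev : Int) (item : List Int) (rest : List (List Int)) :
    pvSegA t tgt prev (item :: rest)
      = PySem.List.slice t (some prev) (some (PySem.List.pyGetD item 0 0)) ++ tgt
          ++ (if rest = [] then PySem.List.slice t (some (PySem.List.pyGetD item 1 0)) none else [])
          ++ pvSegA t tgt (PySem.List.pyGetD item 1 0) rest := rfl

theorem pvFlat_append (l1 l2 : List String) : pvFlat (l1 ++ l2) = pvFlat l1 ++ pvFlat l2 := by
  simp [pvFlat]

theorem pvJoinE : ∀ ls : List (List Char), PySem.Chars.join [] ls = ls.flatten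
  | [] => by simp [PySem.Chars.join_nil]
  | [x] => by simp [PySem.Chars.join_singleton]
  | x :: y :: r => by rw [PySem.Chars.join_cons_cons, pvJoinE (y :: r)]; simp

theorem pvJoinFlat (l : List String) : (PySem.Str.join "" l).toList = pvFlat l := by
  simp [PySem.Str.toList_join, pvJoinE, pvFlat]

theorem pvSliceNil (t : List Char) (b : Int) (h : (t.length : Int) ≤ b) :
    PySem.List.slice t (some b) none = [] := by
  rw [PySem.List.slice_some_none]
  simp only [PySem.List.clampIdx, List.drop_eq_nil_iff]
  split_ifs <;> omega

theorem pvSliceZeroNone (t : List Char) : PySem.List.slice t (some (0 : Int)) none = t := by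
  rw [PySem.List.slice_from t (by omega)]; simp

-- slicing up to stop = len(text) is the same as an open-ended slice
theorem pvSliceLen (t : List Char) (a : Int) :
    PySem.List.slice t (some a) (some (t.length : Int)) = PySem.List.slice t (some a) none := by
  simp [PySem.List.slice, PySem.List.clampIdx]
  split_ifs <;> omega

-- A's conditional tail append flattens to the unconditional tail slice
theorem pvTailFlat (text : String) (b : Int) :
    pvFlat (if b < PySem.Str.len text then [PySem.Str.slice text (some b) none] else [])
      = PySem.List.slice text.toList (some b) none := by
  by_cases hb : b < PySem.Str.len text
  · rw [if_pos hb]; simp [pvFlat, PySem.Str.toList_slice, PySem.Chars.slice_eq_listSlice]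
  · rw [if_neg hb]
    have hble : (text.toList.length : Int) ≤ b := by
      have := PySem.Str.len_eq text
      omega
    simp [pvFlat, pvSliceNil _ _ hble]

theorem pvSegA_eq_seg (t tgt : List Char) :
    ∀ (rest : List (List Int)) (item : List Int) (prev : Int),
      pvSegA t tgt prev (item :: rest) = pvSeg t tgt prev (item :: rest) := by
  intro rest
  induction rest with
  | nil => intro item prev
           simp [pvSegA_cons, pvSegA_nil, pvSeg_cons, pvSeg_nil]
  | cons y r ih =>
    intro item prev
    rw [pvSegA_cons, pvSeg_cons, ih y, if_neg (by simp : ¬ (y :: r) = [])]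
    simp

theorem pvStepA_ne_nil (text : String) (ml : List (List Int)) (tgt : String)
    (acc : List String) (p : Int × List Int) : pvStepA text ml tgt acc p ≠ [] := by
  simp only [pvStepA]; split_ifs <;> first | rfl | simp

theorem pvFoldA_ne_nil (text : String) (ml : List (List Int)) (tgt : String) :
    ∀ (l : List (Int × List Int)) (acc : List String), acc ≠ [] →
      l.foldl (pvStepA text ml tgt) acc ≠ [] := by
  intro l
  induction l with
  | nil => intro acc h; simpa
  | cons p r ih => intro acc _; exact ih _ (pvStepA_ne_nil text ml tgt acc p)

-- the loop invariant for A's fold over the suffix at indices ≥ 1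
theorem pvAloop (text : String) (ml : List (List Int)) (tgt : String) :
    ∀ (rest pre : List (List Int)) (pitem : List Int) (acc : List String),
      ml = pre ++ pitem :: rest →
      pvFlat ((PySem.List.enumerate rest ((pre.length : Int) + 1)).foldl
          (pvStepA text ml tgt) acc)
        = pvFlat acc ++ pvSegA text.toList tgt.toList (PySem.List.pyGetD pitem 1 0) rest := by
  intro rest
  induction rest with
  | nil => intro pre pitem acc _; simp [PySem.List.enumerate_nil, pvSegA_nil]
  | cons item rest' ih =>
    intro pre pitem acc hml
    rw [PySem.List.enumerate_cons, List.foldl_cons]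
    have hidx : PySem.List.pyGetD ml ((pre.length : Int) + 1 - 1) [] = pitem := by
      simp only [hml, show (pre.length : Int) + 1 - 1 = (pre.length : Int) by ring]
      simp [PySem.List.pyGetD]
    have hlen : ((pre.length : Int) + 1 + 1 = (ml.length : Int)) ↔ rest' = [] := by
      subst hml
      simp only [List.length_append, List.length_cons]
      push_cast
      constructor
      · intro h
        exact List.length_eq_zero_iff.mp (by omega)
      · intro h; subst h; simp only [List.length_nil]; omega
    have hstep : pvStepA text ml tgt acc ((pre.length : Int) + 1, item)
        = (acc ++ [PySem.Str.slice text (some (PySem.List.pyGetD pitem 1 0))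
              (some (PySem.List.pyGetD item 0 0))] ++ [tgt])
          ++ (if rest' = [] then
              (if PySem.List.pyGetD item 1 0 < PySem.Str.len text then
                [PySem.Str.slice text (some (PySem.List.pyGetD item 1 0)) none] else [])
            else []) := by
      simp only [pvStepA, hidx]
      have h0 : ¬ ((pre.length : Int) + 1 = 0 ∧ PySem.List.pyGetD item 0 0 ≠ 0) := by
        rintro ⟨h, -⟩; omega
      have hpos : (0 : Int) < (pre.length : Int) + 1 := by omega
      rw [if_neg h0, if_pos hpos]
      by_cases hr : rest' = []
      · rw [if_pos (hlen.mpr hr), if_pos hr]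
        split_ifs <;> first | rfl | simp
      · rw [if_neg (fun h => hr (hlen.mp h)), if_neg hr]
        simp
    rw [hstep]
    by_cases hr : rest' = []
    · subst hr
      rw [if_pos rfl]
      simp only [PySem.List.enumerate_nil, List.foldl_nil]
      rw [pvFlat_append, pvFlat_append, pvFlat_append, pvTailFlat]
      rw [pvSegA_cons, if_pos rfl, pvSegA_nil]
      simp [pvFlat, PySem.Str.toList_slice, PySem.Chars.slice_eq_listSlice, List.append_assoc]
    · rw [if_neg hr, List.append_nil]
      have hc : ((pre ++ [pitem]).length : Int) + 1 = (pre.length : Int) + 1 + 1 := by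
        simp only [List.length_append, List.length_cons, List.length_nil]
        push_cast
        ring
      rw [show (pre.length : Int) + 1 + 1 = ((pre ++ [pitem]).length : Int) + 1 from hc.symm]
      rw [ih (pre ++ [pitem]) item _ (by simp [hml])]
      rw [pvFlat_append, pvFlat_append]
      rw [pvSegA_cons, if_neg hr]
      simp [pvFlat, PySem.Str.toList_slice, PySem.Chars.slice_eq_listSlice, List.append_assoc]

-- B's kept-slices list joined with the target separator is the segment spec
theorem pvBloop (text tgtS : String) :
    ∀ (ml : List (List Int)) (prev : Int),
      PySem.Chars.join tgtS.toList
        ((List.zip (prev :: ml.map (fun s => PySem.List.pyGetD s 1 0))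
            ((ml.map (fun s => PySem.List.pyGetD s 0 0)) ++ [PySem.Str.len text])).map
          (fun p => (PySem.Str.slice text (some p.1) (some p.2)).toList))
      = pvSeg text.toList tgtS.toList prev ml := by
  intro ml
  induction ml with
  | nil =>
    intro prev
    simp only [List.map_nil, List.nil_append, List.zip_cons_cons, List.zip_nil_right,
      List.map_cons, List.map_nil, PySem.Chars.join_singleton, pvSeg_nil]
    rw [PySem.Str.toList_slice]
    simp only [PySem.Chars.slice_eq_listSlice, PySem.Str.len_eq]
    rw [show ((text.toList.length : Int)) = ((text.toList.length : Int)) from rfl]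
    rw [pvSliceLen]
  | cons span rest ih =>
    intro prev
    cases rest with
    | nil =>
      simp only [List.map_cons, List.map_nil, List.cons_append, List.nil_append,
        List.zip_cons_cons, List.zip_nil_right, List.map_cons, List.map_nil]
      rw [PySem.Chars.join_cons_cons, PySem.Chars.join_singleton]
      rw [pvSeg_cons, pvSeg_nil]
      simp only [PySem.Str.toList_slice, PySem.Chars.slice_eq_listSlice, PySem.Str.len_eq,
        pvSliceLen, List.append_assoc]
    | cons y ys =>
      simp only [List.map_cons, List.cons_append, List.zip_cons_cons, List.map_cons]
      rw [PySem.Chars.join_cons_cons]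
      have := ih (PySem.List.pyGetD span 1 0)
      simp only [List.map_cons, List.cons_append, List.zip_cons_cons, List.map_cons] at this
      rw [this, pvSeg_cons]
      simp only [PySem.Str.toList_slice, PySem.Chars.slice_eq_listSlice, List.append_assoc]
      conv_rhs => rw [pvSeg_cons, pvSeg_cons]
      simp [List.append_assoc]

theorem pvB_toList (text : String) (ml : List (List Int)) (tgt : String) :
    (custom_replace_word_alt text ml tgt).toList = pvSeg text.toList tgt.toList 0 ml := by
  unfold custom_replace_word_alt
  rw [PySem.Str.toList_join, List.map_map]
  simp only [Function.comp_def]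
  exact pvBloop text tgt ml 0

theorem pvA_toList (text : String) (ml : List (List Int)) (tgt : String) :
    (custom_replace_word text ml tgt).toList = pvSeg text.toList tgt.toList 0 ml := by
  unfold custom_replace_word
  cases ml with
  | nil =>
    rw [pvSeg_nil, pvSliceZeroNone]
    rfl
  | cons first rest =>
    rw [PySem.List.enumerate_cons, List.foldl_cons]
    have hne : (PySem.List.enumerate rest (0 + 1)).foldl (pvStepA text (first :: rest) tgt)
        (pvStepA text (first :: rest) tgt [] (0, first)) ≠ [] :=
      pvFoldA_ne_nil text (first :: rest) tgt _ _ (pvStepA_ne_nil _ _ _ _ _)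
    rw [if_neg hne, pvJoinFlat]
    have hlen0 : ((0 : Int) + 1 = ((first :: rest).length : Int)) ↔ rest = [] := by
      simp only [List.length_cons]
      push_cast
      constructor
      · intro h
        exact List.length_eq_zero_iff.mp (by omega)
      · intro h; subst h; simp only [List.length_nil]; omega
    have hstep0 : pvStepA text (first :: rest) tgt [] (0, first)
        = ((if PySem.List.pyGetD first 0 0 ≠ 0 then
              [PySem.Str.slice text none (some (PySem.List.pyGetD first 0 0))] else []) ++ [tgt])
          ++ (if rest = [] then
              (if PySem.List.pyGetD first 1 0 < PySem.Str.len text then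
                [PySem.Str.slice text (some (PySem.List.pyGetD first 1 0)) none] else [])
            else []) := by
      by_cases ha : PySem.List.pyGetD first 0 0 = 0 <;>
        by_cases hr : rest = [] <;>
        by_cases hb : PySem.List.pyGetD first 1 0 < PySem.Str.len text <;>
        (simp only [PySem.Str.len_eq, String.length_toList] at hb;
          simp [pvStepA, ha, hr, hb])
    rw [hstep0]
    have hhead : pvFlat (if PySem.List.pyGetD first 0 0 ≠ 0 then
          [PySem.Str.slice text none (some (PySem.List.pyGetD first 0 0))] else [])
        = PySem.List.slice text.toList (some (0 : Int)) (some (PySem.List.pyGetD first 0 0)) := by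
      by_cases ha : PySem.List.pyGetD first 0 0 ≠ 0
      · rw [if_pos ha, PySem.List.slice_zero_start]
        simp [pvFlat, PySem.Str.toList_slice, PySem.Chars.slice_eq_listSlice]
      · rw [if_neg ha]
        have ha0 : PySem.List.pyGetD first 0 0 = 0 := by
          by_contra h; exact ha h
        rw [ha0, PySem.List.slice_zero_start, PySem.List.slice_to text.toList (by omega)]
        simp [pvFlat]
    cases rest with
    | nil =>
      rw [if_pos rfl]
      simp only [PySem.List.enumerate_nil, List.foldl_nil]
      rw [pvFlat_append, pvFlat_append, hhead, pvTailFlat]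
      rw [pvSeg_cons, pvSeg_nil]
      simp [pvFlat, List.append_assoc]
    | cons item rest' =>
      rw [if_neg (by simp : ¬ (item :: rest') = []), List.append_nil]
      have hA := pvAloop text (first :: item :: rest') tgt (item :: rest')
        [] first
        ((if PySem.List.pyGetD first 0 0 ≠ 0 then
            [PySem.Str.slice text none (some (PySem.List.pyGetD first 0 0))] else []) ++ [tgt])
        rfl
      simp only [List.length_nil, Nat.cast_zero, zero_add] at hA ⊢
      rw [hA, pvSegA_eq_seg, pvFlat_append, hhead]
      simp [pvFlat, pvSeg_cons, PySem.List.slice_zero_start, List.append_assoc]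

-- ===== VERDICT (by name: the statement is the Claim_ definition above) =====
theorem custom_replace_word_spec : Claim_equal_custom_replace_word := by
  intro text ml tgt _ _
  unfold Spec_custom_replace_word
  apply String.toList_inj.mp
  rw [pvA_toList, pvB_toList]
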